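-- pv_equiv track=rewrite | github.com/Masoom-Wahid/Ds-Algos | alg/string/string_construction.py | count
-- ===== SOURCE A (Python) =====
-- def count(s : str,D : list[str]) -> int:
--     n = len(s)
--     m = len(D)
--     table = [0] * (n+1)
--
--     for i in range(n):
--         this_res = 0
--         for j in range(m):
--             if s[i] == D[j]: this_res+=1
--
--         table[i] = this_res
--
--     return sum(table)
-- ===== SOURCE B (Python) =====
-- def count(s: str, D: list[str]) -> int:
--     cs = {}
--     for ch in s:
--         cs[ch] = cs.get(ch, 0) + 1
--     cd = {}
--     for w in D:
--         cd[w] = cd.get(w, 0) + 1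
--     total = 0
--     for ch, c in cs.items():
--         total += c * cd.get(ch, 0)
--     return total
-- ===== Notes on version B (the rewrite author's own statement) =====
-- stated objective: faster
-- what changed: Replaces the nested pair scan (every char of s against every element of D) by two frequency tables (Counter of s, Counter of D) and a dot product over the distinct characters of s.
import Mathlib
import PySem

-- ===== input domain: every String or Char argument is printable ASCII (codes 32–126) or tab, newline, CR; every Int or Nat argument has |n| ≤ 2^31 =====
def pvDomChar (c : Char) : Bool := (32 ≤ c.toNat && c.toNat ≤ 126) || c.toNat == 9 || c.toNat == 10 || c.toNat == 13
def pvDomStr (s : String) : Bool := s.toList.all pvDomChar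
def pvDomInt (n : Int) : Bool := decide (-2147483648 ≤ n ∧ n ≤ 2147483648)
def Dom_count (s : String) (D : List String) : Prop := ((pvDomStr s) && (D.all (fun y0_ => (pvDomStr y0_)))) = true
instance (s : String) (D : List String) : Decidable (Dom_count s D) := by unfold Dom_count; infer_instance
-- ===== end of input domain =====

-- B replaces A's nested pair scan by two frequency tables and a dot product over distinct characters (measurably faster on large inputs).

-- ===== PORT A =====
-- Python's s[i] is a one-character str; it is modelled as indexing the list of s's one-character strings (exact).
def count (s : String) (D : List String) : Int :=
  let chars := s.toList.map (fun c => String.ofList [c])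
  let n := PySem.Str.len s
  let m := PySem.List.len D
  let table : List Int := List.replicate (n.toNat + 1) 0   -- [0] * (n+1)
  let table := (PySem.List.pyRange 0 n).foldl (fun table i =>
      let this_res := (PySem.List.pyRange 0 m).foldl (fun r j =>
          if PySem.List.pyGet? chars i = PySem.List.pyGet? D j then r + 1 else r) 0
      PySem.List.pySetD table i this_res) table
  table.sum

-- ===== PORT B =====
def count_alt (s : String) (D : List String) : Int :=
  let cs := (s.toList.map (fun c => String.ofList [c])).foldl
      (fun d ch => d.insert ch (d.getD ch 0 + 1)) PySem.Dict.empty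
  let cd := D.foldl (fun d w => d.insert w (d.getD w 0 + 1)) PySem.Dict.empty
  cs.items.foldl (fun total p => total + p.2 * cd.getD p.1 0) 0

-- ===== PRECONDITION & SPEC =====
def Spec_count (s : String) (D : List String) (out : Int) : Prop := out = count_alt s D
instance (s : String) (D : List String) (out : Int) : Decidable (Spec_count s D out) := by unfold Spec_count; infer_instance

-- ===== CLAIM (what is proved, stated in full; the proofs are below) =====
def Claim_equal_count : Prop := ∀ (s : String) (D : List String), Dom_count s D → Spec_count s D (count s D)

-- ===== LEMMAS AND PROOFS =====

-- A's inner loop counts how often v occurs in D.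
theorem pv_inner (D : List String) (v : String) :
    (List.range D.length).countP (fun j => decide ((some v : Option String) = D[j]?)) = D.count v := by
  induction D with
  | nil => simp
  | cons d D ih =>
    simp only [List.length_cons, List.range_succ_eq_map, List.countP_cons, List.countP_map]
    have h1 : List.countP ((fun j => decide ((some v : Option String) = (d :: D)[j]?)) ∘ Nat.succ)
        (List.range D.length)
        = List.countP (fun j => decide ((some v : Option String) = D[j]?)) (List.range D.length) := by
      apply List.countP_congr
      intro j _
      simp [Function.comp]
    rw [h1, ih, List.count_cons]
    rcases eq_or_ne d v with hv | hv
    · subst hv; simp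
    · simp [hv, Ne.symm hv]

-- A's table-filling loop: fresh indices written left to right.
theorem pv_table (g : Nat → Int) :
    ∀ (n a : Nat) (pre : List Int), pre.length = a →
    (List.range' a n).foldl (fun t i => t.set i (g i)) (pre ++ List.replicate (n + 1) 0)
      = pre ++ (List.range' a n).map g ++ [(0 : Int)] := by
  intro n
  induction n with
  | zero => intro a pre _; simp
  | succ n ih =>
    intro a pre hpre
    rw [List.range'_succ]
    simp only [List.foldl_cons, List.map_cons]
    have hrep : List.replicate (n + 1 + 1) (0 : Int) = 0 :: List.replicate (n + 1) 0 := rfl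
    have hset : (pre ++ List.replicate (n + 1 + 1) (0 : Int)).set a (g a)
        = (pre ++ [g a]) ++ List.replicate (n + 1) 0 := by
      rw [hrep, ← hpre, List.set_append_right _ _ (le_refl _)]
      simp
    rw [hset, ih (a + 1) (pre ++ [g a]) (by simp [hpre])]
    simp

-- Σ f over a list = Σ f over the elements ≠ k, plus (count k) · f k.
theorem pv_split (f : String → Int) (k : String) :
    ∀ (xs : List String),
    ((xs.map f).sum : Int)
      = (((xs.filter (fun x => !(x == k))).map f).sum) + (xs.count k : Int) * f k := by
  intro xs
  induction xs with
  | nil => simp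
  | cons x xs ih =>
    by_cases hx : x = k
    · subst hx
      simp only [List.map_cons, List.sum_cons, List.filter_cons, beq_self_eq_true,
        Bool.not_true, List.count_cons_self]
      push_cast
      rw [ih]; ring
    · simp only [List.map_cons, List.sum_cons, List.filter_cons, List.count_cons]
      have hbe : (x == k) = false := by simp [hx]
      simp only [hbe, Bool.not_false, if_true, List.map_cons, List.sum_cons]
      rw [ih]; push_cast; ring

-- dot product over a complete nodup key list = plain sum over the multiset.
theorem pv_dot (f : String → Int) :
    ∀ (keys xs : List String), keys.Nodup → (∀ x ∈ xs, x ∈ keys) →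
    ((keys.map (fun k => (xs.count k : Int) * f k)).sum) = (xs.map f).sum := by
  intro keys
  induction keys with
  | nil =>
    intro xs _ hmem
    have : xs = [] := by
      cases xs with
      | nil => rfl
      | cons a t => exact absurd (hmem a (by simp)) (by simp)
    simp [this]
  | cons k keys ih =>
    intro xs hnd hmem
    have hk : k ∉ keys := (List.nodup_cons.mp hnd).1
    have hnd' : keys.Nodup := (List.nodup_cons.mp hnd).2
    set xs' := xs.filter (fun x => !(x == k)) with hxs'
    have hcong : keys.map (fun k' => (xs.count k' : Int) * f k')
        = keys.map (fun k' => (xs'.count k' : Int) * f k') := by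
      apply List.map_congr_left
      intro k' hk'
      have hne : k' ≠ k := fun h => hk (h ▸ hk')
      rw [hxs', List.count_filter (by simp [hne])]
    have hmem' : ∀ x ∈ xs', x ∈ keys := by
      intro x hx
      rw [hxs', List.mem_filter] at hx
      have hxk : x ≠ k := by simpa using hx.2
      rcases List.mem_cons.mp (hmem x hx.1) with h | h
      · exact absurd h hxk
      · exact h
    simp only [List.map_cons, List.sum_cons, hcong, ih xs' hnd' hmem']
    rw [pv_split f k xs]; ring

-- (range n).map (getD · dflt) recovers the list.
theorem pv_map_range (xs : List String) :
    (List.range xs.length).map (fun i => xs.getD i "") = xs := by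
  apply List.ext_getElem
  · simp
  · intro i h1 h2
    simp at h1
    simp [List.getD_eq_getElem?_getD, List.getElem?_eq_getElem h1]

-- A computes Σ_{v ∈ chars} count v D.
theorem pv_A_eq (s : String) (D : List String) :
    count s D = (((s.toList.map (fun c => String.ofList [c])).map (fun v => (D.count v : Int))).sum) := by
  unfold count
  dsimp only
  set chars := s.toList.map (fun c => String.ofList [c]) with hchars
  have hlen : chars.length = s.toList.length := by simp [hchars]
  have hn : PySem.Str.len s = (chars.length : Int) := by rw [PySem.Str.len_eq, hlen]
  have hm : PySem.List.len D = (D.length : Int) := rfl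
  set g : Nat → Int := fun i =>
      (PySem.List.pyRange 0 (PySem.List.len D)).foldl (fun r j =>
        if PySem.List.pyGet? chars (i : Int) = PySem.List.pyGet? D j then r + 1 else r) 0 with hg
  -- turn the outer pyRange loop into a range' fold of List.set
  rw [hn, PySem.List.pyRange_zero_natCast, List.foldl_map]
  have hbody : (fun (t : List Int) (k : Nat) =>
      PySem.List.pySetD t (k : Int)
        ((PySem.List.pyRange 0 (PySem.List.len D)).foldl (fun r j =>
          if PySem.List.pyGet? chars (k : Int) = PySem.List.pyGet? D j then r + 1 else r) 0))
      = fun (t : List Int) (i : Nat) => t.set i (g i) := by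
    funext t k
    rw [hg, PySem.List.pySetD_natCast]
  simp only [Int.toNat_natCast]
  rw [hbody, List.range_eq_range',
    show List.replicate (chars.length + 1) (0:Int) = [] ++ List.replicate (chars.length + 1) 0 from rfl,
    pv_table g chars.length 0 [] rfl]
  simp only [List.nil_append, List.sum_append, List.sum_cons, List.sum_nil, add_zero]
  rw [← List.range_eq_range']
  -- evaluate g on in-range indices
  have hgi : ∀ i ∈ List.range chars.length, g i = (D.count (chars.getD i "") : Int) := by
    intro i hi
    rw [List.mem_range] at hi
    have hget : PySem.List.pyGet? chars (i : Int) = some (chars.getD i "") := by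
      rw [PySem.List.pyGet?_natCast, List.getElem?_eq_getElem hi,
        List.getD_eq_getElem?_getD, List.getElem?_eq_getElem hi]
      simp
    rw [hg]
    simp only [hget, hm, PySem.List.pyRange_zero_natCast, List.foldl_map]
    have : (fun (r : Int) (j : Nat) =>
        if (some (chars.getD i "") : Option String) = PySem.List.pyGet? D (j : Int) then r + 1 else r)
        = fun r j => if (decide ((some (chars.getD i "") : Option String) = D[j]?)) = true then r + 1 else r := by
      funext r j
      rw [PySem.List.pyGet?_natCast]
      simp only [decide_eq_true_eq]
    rw [this, PySem.List.foldl_count_if, pv_inner]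
    simp
  rw [List.map_congr_left hgi]
  have : (List.range chars.length).map (fun i => (D.count (chars.getD i "") : Int))
      = (((List.range chars.length).map (fun i => chars.getD i "")).map (fun v => (D.count v : Int))) := by
    rw [List.map_map]; rfl
  rw [this, pv_map_range chars]

-- B computes the dot product over the distinct characters.
theorem pv_B_eq (s : String) (D : List String) :
    count_alt s D = (((PySem.Set.ofList (s.toList.map (fun c => String.ofList [c])) : List String).map
      (fun k => ((s.toList.map (fun c => String.ofList [c])).count k : Int) * (D.count k : Int))).sum) := by
  unfold count_alt
  dsimp only
  set xs := s.toList.map (fun c => String.ofList [c]) with hxs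
  rw [PySem.Dict.foldl_insert_getD_add_one_eq_counter, PySem.Dict.foldl_insert_getD_add_one_eq_counter,
    PySem.Dict.items_counter, PySem.List.foldl_add]
  simp only [List.map_map, zero_add]
  apply congrArg
  apply List.map_congr_left
  intro k _
  simp [PySem.Dict.getD_counter]

-- ===== VERDICT (by name: the statement is the Claim_ definition above) =====
theorem count_spec : Claim_equal_count := by
  intro s D _
  unfold Spec_count
  rw [pv_A_eq, pv_B_eq]
  rw [pv_dot (fun k => (D.count k : Int)) _ _ (PySem.Set.nodup_ofList _)
    (fun x hx => (PySem.Set.mem_ofList _ _).mpr hx)]
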